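-- pv_equiv track=rewrite | github.com/barbarosselimbuyukelci/mobile-ai-ui-ux-revamp-skill | scripts/check_artifact_consistency.py | validate_value_consistency
-- ===== SOURCE A (Python) =====
-- from typing import Dict, List, Set
--
-- CRITICAL_KEYS = [
--     "app_purpose_hypothesis",
--     "primary_operation_sequence",
--     "platform_runtime",
--     "design_system_strategy",
--     "ui_library_stack",
--     "navigation_model",
--     "visual_concept",
--     "copy_terminology_contract",
-- ]
--
-- def validate_value_consistency(parsed: Dict[str, Dict[str, str]]) -> List[str]:
--     issues: List[str] = []
--     for key in CRITICAL_KEYS: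
--         values_by_file: Dict[str, str] = {}
--         for filename, keys in parsed.items():
--             value = keys.get(key, "").strip()
--             if value:
--                 values_by_file[filename] = value
--
--         distinct = sorted(set(values_by_file.values()))
--         if len(distinct) > 1:
--             details = "; ".join(
--                 "{0}='{1}'".format(filename, value)
--                 for filename, value in sorted(values_by_file.items())
--             )
--             issues.append("Cross-artifact conflict for '{0}': {1}".format(key, details))
--     return issues
-- ===== SOURCE B (Python) =====
-- from typing import Dict, List
--
-- CRITICAL_KEYS = [
--     "app_purpose_hypothesis",
--     "primary_operation_sequence",
--     "platform_runtime",
--     "design_system_strategy",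
--     "ui_library_stack",
--     "navigation_model",
--     "visual_concept",
--     "copy_terminology_contract",
-- ]
--
-- def validate_value_consistency(parsed: Dict[str, Dict[str, str]]) -> List[str]:
--     # Flatten-sort-group: no per-key dicts at all.  Collect one flat list of
--     # (key_position, filename, value) triples, sort it by (key_position, filename),
--     # then emit each conflict from one linear scan over the maximal runs of equal
--     # key_position.  Correct because filenames are unique, so sorting the run by
--     # filename reproduces sorted(values_by_file.items()) exactly, and runs appear
--     # in CRITICAL_KEYS order.
--     pos = {key: i for i, key in enumerate(CRITICAL_KEYS)}
--     triples = []
--     for filename, keys in parsed.items():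
--         for key, raw in keys.items():
--             i = pos.get(key)
--             if i is not None:
--                 value = raw.strip()
--                 if value:
--                     triples.append((i, filename, value))
--     triples.sort(key=lambda t: (t[0], t[1]))
--     issues: List[str] = []
--     n = len(triples)
--     start = 0
--     while start < n:
--         end = start
--         while end < n and triples[end][0] == triples[start][0]:
--             end += 1
--         group = triples[start:end]
--         if len(sorted(set(v for _, _, v in group))) > 1:
--             details = "; ".join("{0}='{1}'".format(fn, v) for _, fn, v in group)
--             issues.append(
--                 "Cross-artifact conflict for '{0}': {1}".format(
--                     CRITICAL_KEYS[group[0][0]], details))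
--         start = end
--     return issues
-- ===== Notes on version B (the rewrite author's own statement) =====
-- stated objective: alternative
-- what changed: B replaces A's eight per-key dict-building scans by a flatten-sort-group algorithm: one pass flattens every file's critical entries into (key_position, filename, value) triples, one sort by (key_position, filename) orders them, and one linear scan over the maximal runs of equal key_position emits the conflicts; no {filename: value} dicts are built at all.
import Mathlib
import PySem

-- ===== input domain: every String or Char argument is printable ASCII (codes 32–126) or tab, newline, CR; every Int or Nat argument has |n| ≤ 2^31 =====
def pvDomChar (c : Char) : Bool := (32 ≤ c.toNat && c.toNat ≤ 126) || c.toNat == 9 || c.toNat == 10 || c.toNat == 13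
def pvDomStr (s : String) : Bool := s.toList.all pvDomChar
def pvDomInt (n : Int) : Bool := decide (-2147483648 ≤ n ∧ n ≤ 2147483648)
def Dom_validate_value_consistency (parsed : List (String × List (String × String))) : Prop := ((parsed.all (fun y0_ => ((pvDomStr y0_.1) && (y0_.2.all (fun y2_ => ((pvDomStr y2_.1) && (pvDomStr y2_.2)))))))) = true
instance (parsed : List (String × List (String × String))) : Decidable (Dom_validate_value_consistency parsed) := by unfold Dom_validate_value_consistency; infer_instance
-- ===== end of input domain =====

-- B replaces A's eight per-key dict-building scans by flatten-sort-group: one pass collects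
-- (key_position, filename, value) triples, one sort by (key_position, filename), one linear
-- scan over the maximal runs of equal key_position emits the conflicts (objective: alternative).

def CRITICAL_KEYS : List String :=
  ["app_purpose_hypothesis",
   "primary_operation_sequence",
   "platform_runtime",
   "design_system_strategy",
   "ui_library_stack",
   "navigation_model",
   "visual_concept",
   "copy_terminology_contract"]

-- ===== PORT A =====
def validate_value_consistency (parsed : List (String × List (String × String))) : List String :=
  CRITICAL_KEYS.foldl (fun issues key =>
    let values_by_file : PySem.Dict String String :=
      parsed.foldl (fun vbf fk =>
        let value := PySem.Str.strip ((PySem.Dict.mk fk.2).getD key "")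
        if value ≠ "" then vbf.insert fk.1 value else vbf) PySem.Dict.empty
    let distinct := PySem.List.sorted (PySem.Set.ofList values_by_file.values) (fun x => x) false
    if distinct.length > 1 then
      let details := PySem.Str.join "; "
        ((PySem.List.sorted2 values_by_file.items (fun p => p.1) (fun p => p.2) false).map
          (fun p => p.1 ++ "='" ++ p.2 ++ "'"))
      issues ++ ["Cross-artifact conflict for '" ++ key ++ "': " ++ details]
    else issues) []

-- ===== PORT B =====
-- pos = {key: i for i, key in enumerate(CRITICAL_KEYS)}
def pvPos : PySem.Dict String Int :=
  PySem.Dict.ofList ((PySem.List.enumerate CRITICAL_KEYS).map (fun p => (p.2, p.1)))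

-- Hand-port of Source B's while-loop over the sorted triples: at each step `grp` is exactly the
-- maximal run triples[start:end] with equal first component (takeWhile/dropWhile split off
-- precisely that run), and the scan continues on the remaining suffix — exact.
def pvGroupScan : List (Int × String × String) → List String
  | [] => []
  | t :: rest =>
    let grp := t :: rest.takeWhile (fun u => u.1 == t.1)
    let issue :=
      if (PySem.List.sorted (PySem.Set.ofList (grp.map (fun u => u.2.2))) (fun x => x) false).length > 1 then
        ["Cross-artifact conflict for '" ++ PySem.List.pyGetD CRITICAL_KEYS t.1 "" ++ "': "
          ++ PySem.Str.join "; " (grp.map (fun u => u.2.1 ++ "='" ++ u.2.2 ++ "'"))]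
      else []
    issue ++ pvGroupScan (rest.dropWhile (fun u => u.1 == t.1))
  termination_by l => l.length
  decreasing_by
    simp only [List.length_cons]
    exact Nat.lt_succ_of_le (List.length_dropWhile_le _ _)

def validate_value_consistency_alt (parsed : List (String × List (String × String))) : List String :=
  let triples : List (Int × String × String) :=
    parsed.foldl (fun acc fk =>
      fk.2.foldl (fun acc kv =>
        match pvPos.get? kv.1 with
        | some i =>
          let value := PySem.Str.strip kv.2
          if value ≠ "" then acc ++ [(i, fk.1, value)] else acc
        | none => acc) acc) []
  pvGroupScan (PySem.List.sorted2 triples (fun t => t.1) (fun t => t.2.1) false)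

-- ===== PRECONDITION & SPEC =====
-- Pre_ excludes association lists with a duplicated outer filename or a duplicated key inside
-- one file's map: those do not represent any Python dict (dict keys are unique), so A's
-- behaviour there is an artefact of the encoding.
def Pre_validate_value_consistency (parsed : List (String × List (String × String))) : Prop :=
  (parsed.map Prod.fst).Nodup ∧ ∀ fk ∈ parsed, (fk.2.map Prod.fst).Nodup
instance (parsed : List (String × List (String × String))) : Decidable (Pre_validate_value_consistency parsed) := by unfold Pre_validate_value_consistency; infer_instance

def pvWitness_validate_value_consistency : (List (String × List (String × String))) :=
  [("a.md", [("platform_runtime", "ios")]), ("b.md", [("platform_runtime", "android")])]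

def Spec_validate_value_consistency (parsed : List (String × List (String × String))) (out : List String) : Prop := out = validate_value_consistency_alt parsed
instance (parsed : List (String × List (String × String))) (out : List String) : Decidable (Spec_validate_value_consistency parsed out) := by unfold Spec_validate_value_consistency; infer_instance

-- ===== CLAIM (what is proved, stated in full; the proofs are below) =====
def Claim_equal_validate_value_consistency : Prop := ∀ (parsed : List (String × List (String × String))), Dom_validate_value_consistency parsed → Pre_validate_value_consistency parsed → Spec_validate_value_consistency parsed (validate_value_consistency parsed)

-- ===== LEMMAS AND PROOFS =====

-- the stripped value of `k` in one file entry
def pvVal (fk : String × List (String × String)) (k : String) : String :=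
  PySem.Str.strip ((PySem.Dict.mk fk.2).getD k "")

-- A's values_by_file for key k, as an items list (filenames in parsed order)
def pvPairs (parsed : List (String × List (String × String))) (k : String) : List (String × String) :=
  (parsed.filter (fun fk => decide (pvVal fk k ≠ ""))).map (fun fk => (fk.1, pvVal fk k))

-- the same pairs sorted by filename
def pvS (parsed : List (String × List (String × String))) (k : String) : List (String × String) :=
  PySem.List.sorted (pvPairs parsed k) (fun p => p.1) false

def pvI8 : List Int := [0, 1, 2, 3, 4, 5, 6, 7]

def pvKey (i : Int) : String := PySem.List.pyGetD CRITICAL_KEYS i ""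

-- the sorted triples of bucket i
def pvGrp (parsed : List (String × List (String × String))) (i : Int) : List (Int × String × String) :=
  (pvS parsed (pvKey i)).map (fun p => (i, p.1, p.2))

-- A's contribution for one key (in already-characterised form)
def pvGA (parsed : List (String × List (String × String))) (k : String) : List String :=
  if (PySem.List.sorted (PySem.Set.ofList ((pvPairs parsed k).map (fun p => p.2))) (fun x => x) false).length > 1 then
    ["Cross-artifact conflict for '" ++ k ++ "': "
      ++ PySem.Str.join "; " ((pvS parsed k).map (fun p => p.1 ++ "='" ++ p.2 ++ "'"))]
  else []

-- B's report for one group of the scan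
def pvRep (l : List (Int × String × String)) : List String :=
  match l with
  | [] => []
  | t :: _ =>
    if (PySem.List.sorted (PySem.Set.ofList (l.map (fun u => u.2.2))) (fun x => x) false).length > 1 then
      ["Cross-artifact conflict for '" ++ pvKey t.1 ++ "': "
        ++ PySem.Str.join "; " (l.map (fun u => u.2.1 ++ "='" ++ u.2.2 ++ "'"))]
    else []

-- one inner-loop step of B's collecting pass, as a list-valued function
def pvG (fn : String) (kv : String × String) : List (Int × String × String) :=
  match pvPos.get? kv.1 with
  | some i => if PySem.Str.strip kv.2 ≠ "" then [(i, fn, PySem.Str.strip kv.2)] else []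
  | none => []

theorem pvPos_get?_some (s : String) (i : Int) (h : pvPos.get? s = some i) :
    i ∈ pvI8 ∧ pvKey i = s := by
  have hmk : pvPos = PySem.Dict.mk
      [("app_purpose_hypothesis", 0), ("primary_operation_sequence", 1),
       ("platform_runtime", 2), ("design_system_strategy", 3),
       ("ui_library_stack", 4), ("navigation_model", 5),
       ("visual_concept", 6), ("copy_terminology_contract", 7)] := by decide
  rw [hmk] at h
  simp only [PySem.Dict.get?_mk_cons] at h
  repeat' split at h
  all_goals first
    | (rename_i hb
       injection h with h
       subst i
       exact ⟨by decide, by rw [← (beq_iff_eq).mp hb]; decide⟩)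
    | (exact absurd h (by simp [PySem.Dict.get?]))

theorem pvPos_get?_key (i : Int) (hi : i ∈ pvI8) : pvPos.get? (pvKey i) = some i := by
  simp only [pvI8, List.mem_cons, List.not_mem_nil, or_false] at hi
  rcases hi with rfl | rfl | rfl | rfl | rfl | rfl | rfl | rfl <;> rfl

set_option maxHeartbeats 1000000 in
theorem pv_items_eq (parsed : List (String × List (String × String))) (k : String)
    (h : (parsed.map Prod.fst).Nodup) :
    (parsed.foldl (fun vbf fk =>
        if pvVal fk k ≠ "" then vbf.insert fk.1 (pvVal fk k) else vbf) PySem.Dict.empty).items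
      = pvPairs parsed k := by
  have h1 : List.foldl (fun vbf fk =>
        if pvVal fk k ≠ "" then vbf.insert fk.1 (pvVal fk k) else vbf) PySem.Dict.empty parsed
      = List.foldl (fun vbf fk => vbf.insert fk.1 (pvVal fk k)) PySem.Dict.empty
          (parsed.filter (fun fk => decide (pvVal fk k ≠ ""))) :=
    PySem.List.foldl_ite_eq_foldl_filter (fun fk => pvVal fk k ≠ "")
      (fun vbf fk => vbf.insert fk.1 (pvVal fk k)) parsed PySem.Dict.empty
  rw [h1, PySem.Dict.items_foldl_insert_fresh _ (fun fk => fk.1) (fun fk => pvVal fk k) _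
    (fun a _ => PySem.Dict.contains_empty _)
    (List.Nodup.sublist (List.Sublist.map _ List.filter_sublist) h)]
  rfl

theorem pv_pairs_fst_nodup (parsed : List (String × List (String × String))) (k : String)
    (h : (parsed.map Prod.fst).Nodup) : ((pvPairs parsed k).map Prod.fst).Nodup := by
  unfold pvPairs
  rw [List.map_map]
  exact List.Nodup.sublist (List.Sublist.map _ List.filter_sublist) h

theorem pv_S_fst_lt (parsed : List (String × List (String × String))) (k : String)
    (h : (parsed.map Prod.fst).Nodup) :
    (pvS parsed k).Pairwise (fun p q => p.1 < q.1) := by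
  have hperm : (pvS parsed k).Perm (pvPairs parsed k) := PySem.List.sorted_perm _ _ _
  have hnd : ((pvS parsed k).map Prod.fst).Nodup :=
    ((hperm.map Prod.fst).nodup_iff).mpr (pv_pairs_fst_nodup parsed k h)
  have h1 : (pvS parsed k).Pairwise (fun p q => p.1 ≠ q.1) := List.pairwise_map.mp hnd
  have h2 := PySem.List.sorted_pairwise (pvPairs parsed k) (fun p => p.1)
  exact (h2.and h1).imp (fun hab => lt_of_le_of_ne hab.1 hab.2)

theorem pv_sorted2_eq_sorted_lex {α : Type} {κ₁ κ₂ : Type} [LinearOrder κ₁] [LinearOrder κ₂]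
    (xs : List α) (k1 : α → κ₁) (k2 : α → κ₂) :
    PySem.List.sorted2 xs k1 k2 false
      = PySem.List.sorted xs (fun a => toLex (k1 a, k2 a)) false := by
  rw [PySem.List.sorted_eq_foldl_insertBy]
  show xs.foldl (fun acc x => PySem.List.insertBy
      (fun a b => decide (k1 a < k1 b) || (!decide (k1 b < k1 a) && decide (k2 a < k2 b))) x acc) []
    = _
  have hf : (fun (a b : α) => decide (k1 a < k1 b) || (!decide (k1 b < k1 a) && decide (k2 a < k2 b)))
      = (fun a b => decide ((toLex (k1 a, k2 a) : Lex (κ₁ × κ₂)) < toLex (k1 b, k2 b))) := by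
    funext a b
    rcases lt_trichotomy (k1 a) (k1 b) with hc | hc | hc
    · simp [Prod.Lex.lt_iff, hc]
    · simp [Prod.Lex.lt_iff, hc]
    · simp [Prod.Lex.lt_iff, hc, lt_asymm hc, ne_of_gt hc]
  rw [hf]

theorem pv_sorted2_eq_pvS (parsed : List (String × List (String × String))) (k : String)
    (h : (parsed.map Prod.fst).Nodup) :
    PySem.List.sorted2 (pvPairs parsed k) (fun p => p.1) (fun p => p.2) false = pvS parsed k := by
  rw [pv_sorted2_eq_sorted_lex]
  apply PySem.List.sorted_eq_of_perm_of_pairwise_lt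
  · exact PySem.List.sorted_perm _ _ _
  · exact (pv_S_fst_lt parsed k h).imp (fun hab => Prod.Lex.lt_iff.mpr (Or.inl hab))

theorem pv_A_flatMap (parsed : List (String × List (String × String)))
    (h : (parsed.map Prod.fst).Nodup) :
    validate_value_consistency parsed = CRITICAL_KEYS.flatMap (pvGA parsed) := by
  unfold validate_value_consistency
  refine ((PySem.List.foldl_congr_mem _ _ (fun issues key => issues ++ pvGA parsed key)
    _ ?_).trans ((PySem.List.foldl_append_eq_flatMap _ _ _).trans (by simp)))
  intro issues key _
  show (if (PySem.List.sorted (PySem.Set.ofList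
            (PySem.Dict.values (parsed.foldl (fun vbf fk =>
              if pvVal fk key ≠ "" then vbf.insert fk.1 (pvVal fk key) else vbf) PySem.Dict.empty)))
            (fun x => x) false).length > 1 then
        issues ++ ["Cross-artifact conflict for '" ++ key ++ "': " ++ PySem.Str.join "; "
          ((PySem.List.sorted2 (PySem.Dict.items (parsed.foldl (fun vbf fk =>
              if pvVal fk key ≠ "" then vbf.insert fk.1 (pvVal fk key) else vbf) PySem.Dict.empty))
            (fun p => p.1) (fun p => p.2) false).map (fun p => p.1 ++ "='" ++ p.2 ++ "'"))]
      else issues) = issues ++ pvGA parsed key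
  rw [show PySem.Dict.values (parsed.foldl (fun vbf fk =>
        if pvVal fk key ≠ "" then vbf.insert fk.1 (pvVal fk key) else vbf) PySem.Dict.empty)
      = (parsed.foldl (fun vbf fk =>
        if pvVal fk key ≠ "" then vbf.insert fk.1 (pvVal fk key) else vbf) PySem.Dict.empty).items.map
        (fun p => p.2) from rfl]
  rw [pv_items_eq parsed key h, pv_sorted2_eq_pvS parsed key h]
  unfold pvGA
  split_ifs <;> simp

-- B's triples as a flatMap
theorem pv_triples_eq (parsed : List (String × List (String × String))) :
    parsed.foldl (fun acc fk =>
      fk.2.foldl (fun acc kv =>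
        match pvPos.get? kv.1 with
        | some i =>
          let value := PySem.Str.strip kv.2
          if value ≠ "" then acc ++ [(i, fk.1, value)] else acc
        | none => acc) acc) []
    = parsed.flatMap (fun fk => fk.2.flatMap (pvG fk.1)) := by
  have hinner : ∀ (fk : String × List (String × String)) (acc : List (Int × String × String)),
      fk.2.foldl (fun acc kv =>
        match pvPos.get? kv.1 with
        | some i =>
          let value := PySem.Str.strip kv.2
          if value ≠ "" then acc ++ [(i, fk.1, value)] else acc
        | none => acc) acc = acc ++ fk.2.flatMap (pvG fk.1) := by
    intro fk acc
    refine ((PySem.List.foldl_congr_mem _ _ (fun acc kv => acc ++ pvG fk.1 kv)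
      _ ?_).trans (PySem.List.foldl_append_eq_flatMap _ _ _))
    intro acc kv _
    cases hp : pvPos.get? kv.1 with
    | none => simp [pvG, hp]
    | some i =>
      simp only [pvG, hp]
      split_ifs <;> simp
  exact ((PySem.List.foldl_congr_mem _ _ (fun acc fk => acc ++ fk.2.flatMap (pvG fk.1))
    _ (fun acc fk _ => hinner fk acc)).trans
    ((PySem.List.foldl_append_eq_flatMap _ _ _).trans (by simp)))

theorem pv_tail_bucket (fn : String) (l : List (String × String)) (i : Int) (hi : i ∈ pvI8)
    (hmem : pvKey i ∉ l.map Prod.fst) :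
    (l.flatMap (pvG fn)).filter (fun t => t.1 == i) = [] := by
  rw [List.filter_eq_nil_iff]
  intro t ht
  simp only [List.mem_flatMap] at ht
  obtain ⟨kv, hkv, htg⟩ := ht
  unfold pvG at htg
  cases hp : pvPos.get? kv.1 with
  | none => simp only [hp] at htg; simp at htg
  | some j =>
    simp only [hp] at htg
    by_cases hv : PySem.Str.strip kv.2 ≠ ""
    · rw [if_pos hv] at htg
      simp only [List.mem_singleton] at htg
      subst htg
      simp only [beq_iff_eq]
      intro hji
      subst hji
      exact hmem ((pvPos_get?_some _ _ hp).2 ▸ List.mem_map_of_mem hkv)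
    · rw [if_neg hv] at htg; simp at htg

theorem pv_file_bucket (fn : String) (l : List (String × String))
    (hl : (l.map Prod.fst).Nodup) (i : Int) (hi : i ∈ pvI8) :
    (l.flatMap (pvG fn)).filter (fun t => t.1 == i)
      = if pvVal (fn, l) (pvKey i) ≠ "" then [(i, fn, pvVal (fn, l) (pvKey i))] else [] := by
  induction l with
  | nil =>
    have hv : pvVal (fn, ([] : List (String × String))) (pvKey i) = "" := by
      simp only [pvVal, PySem.Dict.getD_eq_get?_getD, PySem.Dict.get?, List.find?_nil,
        Option.map_none, Option.getD_none]
      rfl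
    simp [hv]
  | cons kv rest ih =>
    obtain ⟨k0, v0⟩ := kv
    rw [List.map_cons, List.nodup_cons] at hl
    have hgetD : pvVal (fn, (k0, v0) :: rest) (pvKey i)
        = if k0 == pvKey i then PySem.Str.strip v0 else pvVal (fn, rest) (pvKey i) := by
      simp only [pvVal, PySem.Dict.getD_eq_get?_getD, PySem.Dict.get?_mk_cons]
      split_ifs <;> rfl
    rw [List.flatMap_cons, List.filter_append]
    by_cases hk : k0 = pvKey i
    · have hhead : pvG fn (k0, v0)
          = if PySem.Str.strip v0 ≠ "" then [(i, fn, PySem.Str.strip v0)] else [] := by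
        unfold pvG
        rw [show (k0, v0).1 = pvKey i from hk, pvPos_get?_key i hi]
      have htail : (rest.flatMap (pvG fn)).filter (fun t => t.1 == i) = [] :=
        pv_tail_bucket fn rest i hi (hk ▸ hl.1)
      have hval : pvVal (fn, (k0, v0) :: rest) (pvKey i) = PySem.Str.strip v0 := by
        rw [hgetD]; simp [hk]
      rw [hhead, htail, hval]
      by_cases hv : PySem.Str.strip v0 ≠ ""
      · rw [if_pos hv]; simp
      · rw [if_neg hv]; simp
    · have hhead : (pvG fn (k0, v0)).filter (fun t => t.1 == i) = [] := by
        rw [List.filter_eq_nil_iff]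
        intro t ht
        unfold pvG at ht
        cases hp : pvPos.get? k0 with
        | none => simp only [hp] at ht; simp at ht
        | some j =>
          simp only [hp] at ht
          by_cases hv : PySem.Str.strip v0 ≠ ""
          · rw [if_pos hv] at ht
            simp only [List.mem_singleton] at ht
            subst ht
            simp only [beq_iff_eq]
            intro hji
            subst hji
            exact hk ((pvPos_get?_some _ _ hp).2.symm)
          · rw [if_neg hv] at ht; simp at ht
      have hval2 : pvVal (fn, (k0, v0) :: rest) (pvKey i) = pvVal (fn, rest) (pvKey i) := by
        rw [hgetD]; simp [hk]
      rw [hhead, hval2, List.nil_append]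
      exact ih hl.2

theorem pv_bucket (parsed : List (String × List (String × String)))
    (hin : ∀ fk ∈ parsed, (fk.2.map Prod.fst).Nodup) (i : Int) (hi : i ∈ pvI8) :
    (parsed.flatMap (fun fk => fk.2.flatMap (pvG fk.1))).filter (fun t => t.1 == i)
      = (pvPairs parsed (pvKey i)).map (fun p => (i, p.1, p.2)) := by
  induction parsed with
  | nil => rfl
  | cons fk rest ih =>
    have hrest : ∀ a ∈ rest, (a.2.map Prod.fst).Nodup :=
      fun a ha => hin a (List.mem_cons_of_mem _ ha)
    rw [List.flatMap_cons, List.filter_append, ih hrest,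
      pv_file_bucket fk.1 fk.2 (hin fk List.mem_cons_self) i hi]
    unfold pvPairs
    rw [List.filter_cons]
    by_cases hv : pvVal fk (pvKey i) ≠ "" <;> simp [hv]

theorem pv_perm_buckets {α : Type} (is : List Int) (hnd : is.Nodup)
    (l : List (Int × α)) (h : ∀ t ∈ l, t.1 ∈ is) :
    (is.flatMap (fun i => l.filter (fun t => t.1 == i))).Perm l := by
  induction is generalizing l with
  | nil =>
    cases l with
    | nil => rfl
    | cons t rest => exact absurd (h t List.mem_cons_self) (by simp)
  | cons i tl ih =>
    rw [List.nodup_cons] at hnd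
    rw [List.flatMap_cons]
    have hbuck : ∀ j ∈ tl, l.filter (fun t => t.1 == j)
        = (l.filter (fun t => !(t.1 == i))).filter (fun t => t.1 == j) := by
      intro j hj
      rw [List.filter_filter]
      apply (List.filter_congr _).symm
      intro t _
      by_cases ht : t.1 = j
      · simp [ht]
        exact fun hji => hnd.1 (hji ▸ hj)
      · simp [ht]
    rw [List.flatMap_congr hbuck]
    have hkeys : ∀ t ∈ l.filter (fun t => !(t.1 == i)), t.1 ∈ tl := by
      intro t ht
      rw [List.mem_filter] at ht
      have := h t ht.1
      simp only [List.mem_cons] at this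
      rcases this with h1 | h1
      · exact absurd h1 (by simpa using ht.2)
      · exact h1
    exact (List.Perm.append_left _ (ih hnd.2 _ hkeys)).trans
      (List.filter_append_perm (fun t => t.1 == i) l)

theorem pv_flatMap_perm {α β : Type} (is : List α) (f g : α → List β)
    (h : ∀ i ∈ is, (f i).Perm (g i)) : (is.flatMap f).Perm (is.flatMap g) := by
  induction is with
  | nil => rfl
  | cons i t ih =>
    simp only [List.flatMap_cons]
    exact (h i List.mem_cons_self).append (ih (fun a ha => h a (List.mem_cons_of_mem _ ha)))

theorem pv_sortedT (parsed : List (String × List (String × String)))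
    (hout : (parsed.map Prod.fst).Nodup)
    (hin : ∀ fk ∈ parsed, (fk.2.map Prod.fst).Nodup) :
    PySem.List.sorted2 (parsed.flatMap (fun fk => fk.2.flatMap (pvG fk.1)))
        (fun t => t.1) (fun t => t.2.1) false
      = pvI8.flatMap (pvGrp parsed) := by
  rw [pv_sorted2_eq_sorted_lex]
  apply PySem.List.sorted_eq_of_perm_of_pairwise_lt
  · have h1 : ∀ i ∈ pvI8, (pvGrp parsed i).Perm
        ((parsed.flatMap (fun fk => fk.2.flatMap (pvG fk.1))).filter (fun t => t.1 == i)) := by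
      intro i hi
      rw [pv_bucket parsed hin i hi]
      exact (PySem.List.sorted_perm _ _ _).map _
    have hkeys : ∀ t ∈ parsed.flatMap (fun fk => fk.2.flatMap (pvG fk.1)), t.1 ∈ pvI8 := by
      intro t ht
      simp only [List.mem_flatMap] at ht
      obtain ⟨fk, _, kv, _, htg⟩ := ht
      unfold pvG at htg
      cases hp : pvPos.get? kv.1 with
      | none => simp only [hp] at htg; simp at htg
      | some j =>
        simp only [hp] at htg
        by_cases hv : PySem.Str.strip kv.2 ≠ ""
        · rw [if_pos hv] at htg
          simp only [List.mem_singleton] at htg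
          subst htg
          exact (pvPos_get?_some _ _ hp).1
        · rw [if_neg hv] at htg; simp at htg
    exact (pv_flatMap_perm pvI8 _ _ h1).trans (pv_perm_buckets pvI8 (by decide) _ hkeys)
  · rw [List.flatMap_def, List.pairwise_flatten]
    constructor
    · intro g hg
      rw [List.mem_map] at hg
      obtain ⟨i, _, rfl⟩ := hg
      unfold pvGrp
      rw [List.pairwise_map]
      refine List.Pairwise.imp ?_ (pv_S_fst_lt parsed (pvKey i) hout)
      intro a b hab
      exact Prod.Lex.lt_iff.mpr (Or.inr ⟨rfl, hab⟩)
    · rw [List.pairwise_map]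
      have hlt : pvI8.Pairwise (· < ·) := by decide
      apply hlt.imp ?_
      intro i j hij x hx y hy
      unfold pvGrp at hx hy
      rw [List.mem_map] at hx hy
      obtain ⟨p, _, rfl⟩ := hx
      obtain ⟨q, _, rfl⟩ := hy
      exact Prod.Lex.lt_iff.mpr (Or.inl hij)

theorem pv_take_drop_split {α : Type} (p : α → Bool) (xs ys : List α)
    (hx : ∀ x ∈ xs, p x = true) (hy : ∀ y ∈ ys, p y = false) :
    (xs ++ ys).takeWhile p = xs ∧ (xs ++ ys).dropWhile p = ys := by
  induction xs with
  | nil =>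
    simp only [List.nil_append]
    cases ys with
    | nil => simp
    | cons y t => simp [hy y List.mem_cons_self]
  | cons x t ih =>
    have hx0 := hx x List.mem_cons_self
    have := ih (fun a ha => hx a (List.mem_cons_of_mem _ ha))
    simp [hx0, this.1, this.2]

theorem pv_groupScan_append (i : Int) (g rest : List (Int × String × String)) (hg : g ≠ [])
    (hgi : ∀ t ∈ g, t.1 = i) (hr : ∀ t ∈ rest, i < t.1) :
    pvGroupScan (g ++ rest) = pvRep g ++ pvGroupScan rest := by
  cases g with
  | nil => exact absurd rfl hg
  | cons t gt =>
    have ht := hgi t List.mem_cons_self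
    have hsplit := pv_take_drop_split (fun u => u.1 == t.1) gt rest
      (fun x hx => by simp [hgi x (List.mem_cons_of_mem _ hx), ht])
      (fun y hy => by simp [ht]; exact ne_of_gt (ht ▸ hr y hy))
    rw [List.cons_append, pvGroupScan, hsplit.1, hsplit.2]
    rfl

theorem pv_groupScan_flatMap (is : List Int) (his : is.Pairwise (· < ·))
    (g : Int → List (Int × String × String)) (hgi : ∀ i ∈ is, ∀ t ∈ g i, t.1 = i) :
    pvGroupScan (is.flatMap g) = is.flatMap (fun i => pvRep (g i)) := by
  induction is with
  | nil => simp [pvGroupScan]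
  | cons i tl ih =>
    rw [List.pairwise_cons] at his
    have hgi' : ∀ j ∈ tl, ∀ t ∈ g j, t.1 = j :=
      fun j hj => hgi j (List.mem_cons_of_mem _ hj)
    have hrest : ∀ t ∈ tl.flatMap g, i < t.1 := by
      intro t ht
      rw [List.mem_flatMap] at ht
      obtain ⟨j, hj, htj⟩ := ht
      rw [hgi' j hj t htj]
      exact his.1 j hj
    rw [List.flatMap_cons, List.flatMap_cons]
    cases hgz : g i with
    | nil => rw [List.nil_append]; show pvGroupScan (tl.flatMap g) = pvRep [] ++ _; rw [ih his.2 hgi']; rfl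
    | cons t gt =>
      rw [← hgz, pv_groupScan_append i (g i) _ (by rw [hgz]; simp)
        (hgi i List.mem_cons_self) hrest, ih his.2 hgi']

theorem pv_set_len_of_perm {α : Type} [BEq α] [LawfulBEq α] [DecidableEq α] (xs ys : List α)
    (h : xs.Perm ys) : (PySem.Set.ofList xs).length = (PySem.Set.ofList ys).length := by
  have hperm : (PySem.Set.ofList xs).Perm (PySem.Set.ofList ys) := by
    apply (List.perm_ext_iff_of_nodup (PySem.Set.nodup_ofList xs) (PySem.Set.nodup_ofList ys)).mpr
    intro a
    simp only [PySem.Set.mem_ofList]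
    exact h.mem_iff
  exact hperm.length_eq

theorem pv_rep_eq_gA (parsed : List (String × List (String × String))) (i : Int) :
    pvRep (pvGrp parsed i) = pvGA parsed (pvKey i) := by
  have hlen : (PySem.List.sorted (PySem.Set.ofList ((pvGrp parsed i).map (fun u => u.2.2)))
        (fun x => x) false).length
      = (PySem.List.sorted (PySem.Set.ofList ((pvPairs parsed (pvKey i)).map (fun p => p.2)))
        (fun x => x) false).length := by
    rw [PySem.List.length_sorted, PySem.List.length_sorted]
    apply pv_set_len_of_perm
    have : (pvGrp parsed i).map (fun u => u.2.2) = (pvS parsed (pvKey i)).map (fun p => p.2) := by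
      unfold pvGrp; rw [List.map_map]; rfl
    rw [this]
    exact (PySem.List.sorted_perm _ _ _).map _
  cases hnil : pvS parsed (pvKey i) with
  | nil =>
    have hpairs : pvPairs parsed (pvKey i) = [] :=
      (PySem.List.sorted_eq_nil_iff _ _ _).mp hnil
    unfold pvRep pvGrp pvGA
    rw [hnil, hpairs]
    rfl
  | cons p s' =>
    have hgrp : pvGrp parsed i = (i, p.1, p.2) :: s'.map (fun q => (i, q.1, q.2)) := by
      unfold pvGrp; rw [hnil]; rfl
    unfold pvRep
    rw [hgrp]
    show (if (PySem.List.sorted (PySem.Set.ofList (((i, p.1, p.2) ::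
        s'.map (fun q => (i, q.1, q.2))).map (fun u => u.2.2))) (fun x => x) false).length > 1 then _ else _)
      = pvGA parsed (pvKey i)
    rw [← hgrp]
    unfold pvGA
    have hdet : (pvGrp parsed i).map (fun u => u.2.1 ++ "='" ++ u.2.2 ++ "'")
        = (pvS parsed (pvKey i)).map (fun q => q.1 ++ "='" ++ q.2 ++ "'") := by
      unfold pvGrp; rw [List.map_map]; rfl
    rw [hlen, hdet]

-- ===== VERDICT (by name: the statement is the Claim_ definition above) =====
theorem validate_value_consistency_spec : Claim_equal_validate_value_consistency := by
  intro parsed _ hpre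
  obtain ⟨hout, hin⟩ := hpre
  unfold Spec_validate_value_consistency
  rw [pv_A_flatMap parsed hout]
  show CRITICAL_KEYS.flatMap (pvGA parsed)
    = pvGroupScan (PySem.List.sorted2 (parsed.foldl (fun acc fk =>
        fk.2.foldl (fun acc kv =>
          match pvPos.get? kv.1 with
          | some i =>
            let value := PySem.Str.strip kv.2
            if value ≠ "" then acc ++ [(i, fk.1, value)] else acc
          | none => acc) acc) []) (fun t => t.1) (fun t => t.2.1) false)
  rw [pv_triples_eq, pv_sortedT parsed hout hin,
    pv_groupScan_flatMap pvI8 (by decide) (pvGrp parsed)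
      (by intro i hi t ht
          simp only [pvGrp, List.mem_map] at ht
          obtain ⟨p, _, hp⟩ := ht
          rw [← hp])]
  rw [List.flatMap_congr (g := fun i => pvGA parsed (pvKey i))
    (fun i _ => pv_rep_eq_gA parsed i)]
  rfl
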